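-- pv_equiv track=rewrite | github.com/adrianyaniri/estructuraDatos | recursividad.py | cantiCucaEnEdificio
-- ===== SOURCE A (Python) =====
-- def cucasEnPiso(piso):
--     cant = None
--     if piso > 0:
--         if piso == 1:
--             cant = 1
--         elif piso % 2 == 0:
--             cant = piso * 2
--         else:
--             cant = cucasEnPiso(piso-2) + cucasEnPiso(piso -1)
--     else:
--         raise Exception('')
--     return cant
--
-- def cantiCucaEnEdificio(nroPisos):
--     cant = None
--     if nroPisos > 0:
--         if nroPisos == 1:
--             cant = cucasEnPiso(nroPisos)
--         else:
--             cant = cucasEnPiso(nroPisos) + cantiCucaEnEdificio(nroPisos -1)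
--     else:
--         raise Exception('piso no valido')
--     return cant
-- ===== SOURCE B (Python) =====
-- def cantiCucaEnEdificio(nroPisos):
--     # Closed form. Per floor p: p even -> 2p; p odd with p = 2k+1 -> 2k^2+2k+1
--     # (c(odd p) = c(p-2) + 2(p-1) telescopes to an arithmetic series), so the
--     # building total is a polynomial in the floor count, computed in O(1).
--     if nroPisos <= 0:
--         raise ValueError('piso no valido')
--     e = nroPisos // 2          # number of even floors
--     o = (nroPisos + 1) // 2    # number of odd floors (k = 0..o-1)
--     return 2 * e * (e + 1) + o * (2 * o * o + 1) // 3
-- ===== Notes on version B (the rewrite author's own statement) =====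
-- stated objective: faster
-- what changed: Replaced the doubly recursive per-floor count and the recursive summation over floors by a single closed-form polynomial formula (arithmetic-series telescoping of the odd-floor recurrence), computed in O(1).
-- outside the precondition, e.g. on cantiCucaEnEdificio(0): A raises Exception, B raises ValueError
import Mathlib
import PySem

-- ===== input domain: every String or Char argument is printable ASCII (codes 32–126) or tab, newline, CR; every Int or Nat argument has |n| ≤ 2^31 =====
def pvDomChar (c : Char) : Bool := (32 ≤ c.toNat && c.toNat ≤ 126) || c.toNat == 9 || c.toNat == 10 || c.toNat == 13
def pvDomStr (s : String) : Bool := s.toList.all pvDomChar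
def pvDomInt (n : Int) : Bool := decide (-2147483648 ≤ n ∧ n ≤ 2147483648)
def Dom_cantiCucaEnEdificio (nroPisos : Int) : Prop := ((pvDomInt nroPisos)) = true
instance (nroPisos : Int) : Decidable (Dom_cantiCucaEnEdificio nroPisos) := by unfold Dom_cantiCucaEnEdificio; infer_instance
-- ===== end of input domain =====

-- B replaces A's doubly recursive floor counts and recursive summation by one
-- closed-form polynomial formula (objective: faster; the `0` branches below sit
-- only where both Pythons raise, outside Pre_).

-- ===== PORT A =====
def cucasEnPiso (piso : Int) : Int :=
  if piso > 0 then
    if piso = 1 then 1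
    else if PySem.Int.mod piso 2 = 0 then piso * 2
    else cucasEnPiso (piso - 2) + cucasEnPiso (piso - 1)
  else 0  -- Python raises Exception here; excluded by Pre_
termination_by piso.toNat
decreasing_by all_goals omega

def cantiCucaEnEdificio (nroPisos : Int) : Int :=
  if nroPisos > 0 then
    if nroPisos = 1 then cucasEnPiso nroPisos
    else cucasEnPiso nroPisos + cantiCucaEnEdificio (nroPisos - 1)
  else 0  -- Python raises Exception('piso no valido') here; excluded by Pre_
termination_by nroPisos.toNat
decreasing_by omega

-- ===== PORT B =====
def cantiCucaEnEdificio_alt (nroPisos : Int) : Int :=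
  if nroPisos ≤ 0 then 0  -- Source B raises ValueError here; excluded by Pre_
  else
    let e := PySem.Int.floordiv nroPisos 2
    let o := PySem.Int.floordiv (nroPisos + 1) 2
    2 * e * (e + 1) + PySem.Int.floordiv (o * (2 * o * o + 1)) 3

-- ===== PRECONDITION & SPEC =====
-- Pre_ excludes exactly the inputs nroPisos ≤ 0, on which A raises Exception.
def Pre_cantiCucaEnEdificio (nroPisos : Int) : Prop := 1 ≤ nroPisos
instance (nroPisos : Int) : Decidable (Pre_cantiCucaEnEdificio nroPisos) := by unfold Pre_cantiCucaEnEdificio; infer_instance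
def pvWitness_cantiCucaEnEdificio : Int := 3

def Spec_cantiCucaEnEdificio (nroPisos : Int) (out : Int) : Prop := out = cantiCucaEnEdificio_alt nroPisos
instance (nroPisos : Int) (out : Int) : Decidable (Spec_cantiCucaEnEdificio nroPisos out) := by unfold Spec_cantiCucaEnEdificio; infer_instance

-- ===== CLAIM (what is proved, stated in full; the proofs are below) =====
def Claim_equal_cantiCucaEnEdificio : Prop := ∀ (nroPisos : Int), Dom_cantiCucaEnEdificio nroPisos → Pre_cantiCucaEnEdificio nroPisos → Spec_cantiCucaEnEdificio nroPisos (cantiCucaEnEdificio nroPisos)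

-- ===== LEMMAS AND PROOFS =====

-- o * (2*o^2 + 1) is always divisible by 3 (check o mod 3 ∈ {0,1,2}).
theorem pv_three_dvd (o : Int) : (3:Int) ∣ o * (2 * o * o + 1) := by
  have h3 : o % 3 = 0 ∨ o % 3 = 1 ∨ o % 3 = 2 := by omega
  have ho : o = 3 * (o / 3) + o % 3 := by omega
  set q := o / 3 with hq
  rcases h3 with h | h | h
  · exact ⟨(q) * (2 * o * o + 1), by rw [ho, h]; ring⟩
  · exact ⟨o * (6 * q * q + 4 * q + 1), by rw [ho, h]; ring⟩
  · exact ⟨o * (6 * q * q + 8 * q + 3), by rw [ho, h]; ring⟩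

theorem pv_fdiv3 (o : Int) :
    3 * PySem.Int.floordiv (o * (2 * o * o + 1)) 3 = o * (2 * o * o + 1) := by
  rw [PySem.Int.floordiv_eq_ediv_of_pos (by norm_num)]
  exact Int.mul_ediv_cancel' (pv_three_dvd o)

-- Closed form for the per-floor count, on Nat.
theorem pv_cucas_closed (m : Nat) (hm : 1 ≤ m) :
    cucasEnPiso (m : Int) =
      if m % 2 = 0 then 2 * (m : Int)
      else 2 * ((m / 2 : Nat) : Int) * ((m / 2 : Nat) : Int) + 2 * ((m / 2 : Nat) : Int) + 1 := by
  induction m using Nat.strong_induction_on with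
  | _ m ih =>
    rw [cucasEnPiso]
    rcases Nat.lt_or_ge m 2 with h2 | h2
    · interval_cases m
      · norm_num
    · have hpos : (m : Int) > 0 := by exact_mod_cast Nat.lt_of_lt_of_le Nat.zero_lt_one hm
      have hne : (m : Int) ≠ 1 := by exact_mod_cast show m ≠ 1 by omega
      rw [if_pos hpos, if_neg hne]
      have hmod : PySem.Int.mod (m : Int) 2 = ((m % 2 : Nat) : Int) := by
        exact_mod_cast PySem.Int.mod_natCast m 2
      by_cases he : m % 2 = 0
      · rw [hmod, he]; simp [mul_comm]
      · have he1 : m % 2 = 1 := by omega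
        rw [hmod, he1, if_neg (show ¬((1:Nat):Int) = 0 by norm_num),
           if_neg (show ¬(1 = 0) by norm_num)]
        -- odd branch: m = 2k+1, k ≥ 1
        have hc2 : (m : Int) - 2 = ((m - 2 : Nat) : Int) := by push_cast [Nat.cast_sub h2]; ring
        have hc1 : (m : Int) - 1 = ((m - 1 : Nat) : Int) := by
          push_cast [Nat.cast_sub (by omega : 1 ≤ m)]; ring
        rw [hc2, hc1, ih (m - 2) (by omega) (by omega), ih (m - 1) (by omega) (by omega)]
        have h2e : (m - 2) % 2 = 1 := by omega
        have h1e : (m - 1) % 2 = 0 := by omega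
        rw [if_neg (show ¬((m-2) % 2 = 0) by omega), if_pos h1e]
        obtain ⟨k, hk⟩ : ∃ k, m = 2 * k + 1 := ⟨m / 2, by omega⟩
        have hk1 : 1 ≤ k := by omega
        have e1 : (m - 2) / 2 = k - 1 := by omega
        have e2 : m / 2 = k := by omega
        have e3 : m - 1 = 2 * k := by omega
        rw [e1, e2, e3]
        push_cast [Nat.cast_sub hk1]
        ring

-- B's closed form on Nat inputs ≥ 1, with the divisions moved to Nat.
theorem pv_alt_nat (j : Nat) (hj : 1 ≤ j) :
    cantiCucaEnEdificio_alt (j : Int) =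
      2 * ((j / 2 : Nat) : Int) * (((j / 2 : Nat) : Int) + 1)
        + PySem.Int.floordiv
            ((((j + 1) / 2 : Nat) : Int) *
              (2 * (((j + 1) / 2 : Nat) : Int) * (((j + 1) / 2 : Nat) : Int) + 1)) 3 := by
  have d1 : PySem.Int.floordiv (j : Int) 2 = ((j / 2 : Nat) : Int) := by
    exact_mod_cast PySem.Int.floordiv_natCast j 2
  have d2 : PySem.Int.floordiv ((j : Int) + 1) 2 = (((j + 1) / 2 : Nat) : Int) := by
    rw [show ((j : Int) + 1) = ((j + 1 : Nat) : Int) by push_cast; ring]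
    exact_mod_cast PySem.Int.floordiv_natCast (j + 1) 2
  rw [cantiCucaEnEdificio_alt, if_neg (show ¬((j : Int) ≤ 0) by exact_mod_cast by omega)]
  dsimp only
  rw [d1, d2]

-- A = B on Nat inputs ≥ 1.
theorem pv_canti_nat (m : Nat) (hm : 1 ≤ m) :
    cantiCucaEnEdificio (m : Int) = cantiCucaEnEdificio_alt (m : Int) := by
  induction m, hm using Nat.le_induction with
  | base =>
    rw [cantiCucaEnEdificio, cucasEnPiso, pv_alt_nat 1 (by omega)]
    norm_num [PySem.Int.floordiv]
  | succ m hm ih =>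
    have hn : ((m + 1 : Nat) : Int) = (m : Int) + 1 := by push_cast; ring
    rw [cantiCucaEnEdificio]
    have hpos : ((m + 1 : Nat) : Int) > 0 := by positivity
    have hne : ((m + 1 : Nat) : Int) ≠ 1 := by exact_mod_cast show m + 1 ≠ 1 by omega
    rw [if_pos hpos, if_neg hne]
    have hstep : ((m + 1 : Nat) : Int) - 1 = (m : Int) := by rw [hn]; ring
    rw [hstep, ih, pv_cucas_closed (m + 1) (by omega), pv_alt_nat m hm,
      pv_alt_nat (m + 1) (by omega)]
    obtain ⟨t, ht⟩ : ∃ t, m = 2 * t ∨ m = 2 * t + 1 := ⟨m / 2, by omega⟩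
    rcases ht with ht | ht
    · -- m even, new floor m+1 odd: the floor count o grows from t to t+1
      rw [if_neg (show ¬((m + 1) % 2 = 0) by omega)]
      rw [show (m + 1) / 2 = t by omega, show (m + 2) / 2 = t + 1 by omega,
        show m / 2 = t by omega]
      have hA := pv_fdiv3 ((t : Int) + 1)
      have hB := pv_fdiv3 (t : Int)
      have hXY : ((t : Int) + 1) * (2 * ((t : Int) + 1) * ((t : Int) + 1) + 1)
          = (t : Int) * (2 * (t : Int) * (t : Int) + 1)
            + 3 * (2 * (t : Int) * (t : Int) + 2 * (t : Int) + 1) := by ring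
      push_cast at hA hB hXY ⊢
      linarith [hA, hB, hXY]
    · -- m odd, new floor m+1 even: o stays t+1, the fdiv-3 terms cancel
      rw [if_pos (show (m + 1) % 2 = 0 by omega)]
      rw [show (m + 1) / 2 = t + 1 by omega, show (m + 2) / 2 = t + 1 by omega,
        show m / 2 = t by omega, ht]
      push_cast
      ring

-- ===== VERDICT (by name: the statement is the Claim_ definition above) =====
theorem cantiCucaEnEdificio_spec : Claim_equal_cantiCucaEnEdificio := by
  intro n _ hpre
  have h1 : (1:Int) ≤ n := hpre
  unfold Spec_cantiCucaEnEdificio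
  have hn : n = ((n.toNat : Nat) : Int) := by omega
  rw [hn]
  exact pv_canti_nat n.toNat (by omega)
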